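-- pv_equiv track=rewrite | github.com/yeonjan/Algorithm | ptyhon/Baekjoon/Part1/쉽게 푸는 문제.py | easy
-- ===== SOURCE A (Python) =====
-- def easy(num):
--     sum = 0
--     state = 1
--     end = 0
--     for _ in range(num):
--         sum += state
--         end += 1
--         if end == state:
--             end = 0
--             state += 1
--     return sum
-- ===== SOURCE B (Python) =====
-- def easy(num):
--     # process whole groups (k repeated k times) at once: O(sqrt(num)) instead of O(num)
--     if num <= 0:
--         return 0
--     total = 0
--     k = 1
--     rem = num
--     while rem > k:
--         total += k * k
--         rem -= k
--         k += 1
--     return total + k * rem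
-- ===== Notes on version B (the rewrite author's own statement) =====
-- stated objective: faster
-- what changed: Replaces the per-term loop with a per-group loop that adds k*k for each complete group of k equal terms and k*rem for the partial last group, O(sqrt(n)) iterations instead of O(n).
import Mathlib
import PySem

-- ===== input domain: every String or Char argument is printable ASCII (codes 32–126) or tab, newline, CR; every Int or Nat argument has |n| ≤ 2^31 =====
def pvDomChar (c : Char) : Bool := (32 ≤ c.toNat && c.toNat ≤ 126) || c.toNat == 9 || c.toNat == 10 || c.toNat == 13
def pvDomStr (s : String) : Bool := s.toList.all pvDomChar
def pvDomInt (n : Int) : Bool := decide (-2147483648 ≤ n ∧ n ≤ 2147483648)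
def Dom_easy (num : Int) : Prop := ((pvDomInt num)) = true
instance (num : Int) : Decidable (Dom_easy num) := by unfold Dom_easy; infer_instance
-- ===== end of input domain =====

-- B replaces A's per-term O(num) loop by a per-group O(sqrt(num)) loop (add k*k per full group).

-- ===== PORT A =====
-- state = (sum, state, end); one iteration of A's for-body
def easyStep (s : Int × Int × Int) : Int × Int × Int :=
  let sum := s.1 + s.2.1
  let e := s.2.2 + 1
  if e = s.2.1 then (sum, s.2.1 + 1, 0) else (sum, s.2.1, e)

def easy (num : Int) : Int :=
  ((PySem.List.pyRange 0 num 1).foldl (fun s _ => easyStep s) (0, 1, 0)).1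

-- ===== PORT B =====
-- the while-loop of Source B: rem, k as the (always positive) loop variables
def easyGo (rem k : Nat) (total : Int) : Int :=
  if k < rem then easyGo (rem - k) (k + 1) (total + (k : Int) * (k : Int))
  else total + (k : Int) * (rem : Int)
termination_by rem - k
decreasing_by omega

def easy_alt (num : Int) : Int :=
  if num ≤ 0 then 0 else easyGo num.toNat 1 0

-- ===== PRECONDITION & SPEC =====
def Spec_easy (num : Int) (out : Int) : Prop := out = easy_alt num
instance (num : Int) (out : Int) : Decidable (Spec_easy num out) := by unfold Spec_easy; infer_instance

-- ===== CLAIM (what is proved, stated in full; the proofs are below) =====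
def Claim_equal_easy : Prop := ∀ (num : Int), Dom_easy num → Spec_easy num (easy num)

-- ===== LEMMAS AND PROOFS =====

-- a foldl whose body ignores the list element is an iterate
theorem foldl_const_iterate {α β : Type} (f : α → α) (l : List β) (init : α) :
    l.foldl (fun s _ => f s) init = f^[l.length] init := by
  induction l generalizing init with
  | nil => rfl
  | cons x xs ih => simp [List.foldl, ih, Function.iterate_succ_apply]

-- within one group: j ≤ k steps from (total, k, 0)
theorem easyStep_group (k : Nat) (hk : 1 ≤ k) :
    ∀ (j : Nat), j ≤ k → ∀ (total : Int),
      easyStep^[j] (total, (k : Int), 0) =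
        if j < k then (total + (k : Int) * (j : Int), (k : Int), (j : Int))
        else (total + (k : Int) * (k : Int), (k : Int) + 1, 0) := by
  intro j
  induction j with
  | zero =>
    intro _ total
    simp only [Function.iterate_zero, id]
    rw [if_pos (by omega)]
    simp
  | succ j ih =>
    intro hj total
    rw [Function.iterate_succ_apply', ih (by omega) total, if_pos (by omega)]
    simp only [easyStep]
    by_cases h : (j : Int) + 1 = (k : Int)
    · rw [if_pos h, if_neg (by omega)]
      have hj' : (j : Int) = (k : Int) - 1 := by omega
      have hs : total + (k : Int) * (j : Int) + (k : Int)
          = total + (k : Int) * (k : Int) := by rw [hj']; ring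
      rw [hs]
    · rw [if_neg h, if_pos (by omega)]
      have hs : total + (k : Int) * (j : Int) + (k : Int)
          = total + (k : Int) * ((j : Nat) + 1 : Nat) := by push_cast; ring
      rw [hs]
      push_cast
      rfl

-- A's loop from a group boundary computes B's group loop
theorem easyStep_eq_easyGo :
    ∀ (rem k : Nat), 1 ≤ k → ∀ (total : Int),
      (easyStep^[rem] (total, (k : Int), 0)).1 = easyGo rem k total := by
  intro rem
  induction rem using Nat.strong_induction_on with
  | _ rem ih =>
    intro k hk total
    rw [easyGo]
    by_cases h : k < rem
    · rw [if_pos h]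
      have hsplit : rem = (rem - k) + k := by omega
      conv_lhs => rw [hsplit]
      rw [Function.iterate_add_apply,
          easyStep_group k hk k (le_refl k) total, if_neg (by omega)]
      have := ih (rem - k) (by omega) (k + 1) (by omega) (total + (k : Int) * (k : Int))
      push_cast at this ⊢
      exact this
    · rw [if_neg h]
      rw [easyStep_group k hk rem (by omega) total]
      by_cases h2 : rem < k
      · rw [if_pos h2]
      · rw [if_neg h2]
        have : rem = k := by omega
        subst this
        ring_nf

-- ===== VERDICT (by name: the statement is the Claim_ definition above) =====
theorem easy_spec : Claim_equal_easy := by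
  intro num _
  unfold Spec_easy easy easy_alt
  rw [foldl_const_iterate, PySem.List.length_pyRange_one]
  by_cases h : num ≤ 0
  · rw [if_pos h]
    have : (num - 0).toNat = 0 := by omega
    rw [this]
    rfl
  · rw [if_neg h]
    have : (num - 0).toNat = num.toNat := by omega
    rw [this, ← easyStep_eq_easyGo num.toNat 1 (le_refl 1) 0]
    norm_num
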